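-- pv_equiv track=rewrite | github.com/xinofekuator/university-projects | Python/homology_groups/GruposHomología.py | sublistas
-- ===== SOURCE A (Python) =====
-- def sublistas(lista):
--
--    resultado=[]
--    tam=len(lista)
--    for i in range(tam):
--       listaAux=[]
--       for j in range(tam-1):
--          listaAux.append(lista[(i+j)%tam])
--       resultado.append(listaAux)
--    #En caso de estar vacía termina porque no entra en el caso recursivo
--    for i in resultado:
--       resultado= resultado+sublistas(i)
--    return resultado
-- ===== SOURCE B (Python) =====
-- def sublistas(lista):
--     result = []
--     stack = [lista]
--     while stack:
--         cur = stack.pop(0)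
--         n = len(cur)
--         rots = [[cur[(i + j) % n] for j in range(n - 1)] for i in range(n)]
--         result += rots
--         stack = rots + stack
--     return result
-- ===== Notes on version B (the rewrite author's own statement) =====
-- stated objective: alternative
-- what changed: Replaced A's recursion (rotations built by nested append loops, then a loop concatenating recursive calls) with an explicit-worklist preorder loop: pop a list, emit its cyclic rotations, and push them at the front of the stack.
import Mathlib
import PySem

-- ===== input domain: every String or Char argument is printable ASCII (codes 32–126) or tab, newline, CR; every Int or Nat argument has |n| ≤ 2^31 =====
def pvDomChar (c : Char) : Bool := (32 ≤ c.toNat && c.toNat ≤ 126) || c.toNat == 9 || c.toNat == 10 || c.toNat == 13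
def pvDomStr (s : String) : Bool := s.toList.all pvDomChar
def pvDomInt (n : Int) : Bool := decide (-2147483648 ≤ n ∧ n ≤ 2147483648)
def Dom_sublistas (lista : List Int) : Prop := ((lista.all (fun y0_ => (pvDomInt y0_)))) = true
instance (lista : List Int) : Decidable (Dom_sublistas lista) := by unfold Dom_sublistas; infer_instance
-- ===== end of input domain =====

-- B replaces A's recursion by an explicit-stack (worklist) preorder loop over the
-- rotation tree: a genuinely different decomposition, same values (objective: alternative).

-- ===== PORT A =====
-- inner loop 'for j in range(tam-1): listaAux.append(lista[(i+j)%tam])';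
-- the index (i+j)%tam is always in range 0..tam-1 (tam>0 there), so pyGetD with
-- default 0 is exact (the default is never taken).
def sublistasRowA (lista : List Int) (i : Int) : List Int :=
  (PySem.List.pyRange 0 ((lista.length : Int) - 1) 1).foldl
    (fun listaAux j =>
      listaAux ++ [PySem.List.pyGetD lista (PySem.Int.mod (i + j) (lista.length : Int)) 0]) []

-- length of one row, needed for termination of sublistas
theorem sublistasRowA_length (lista : List Int) (i : Int) :
    (sublistasRowA lista i).length = ((lista.length : Int) - 1).toNat := by
  unfold sublistasRowA
  rw [show ∀ (l : List Int) (acc : List Int),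
        (l.foldl (fun a j => a ++ [PySem.List.pyGetD lista (PySem.Int.mod (i + j) (lista.length : Int)) 0]) acc)
          = acc ++ l.map (fun j => PySem.List.pyGetD lista (PySem.Int.mod (i + j) (lista.length : Int)) 0) from by
        intro l
        induction l with
        | nil => simp
        | cons x xs ih => intro acc; simp [List.foldl_cons, ih]]
  simp [PySem.List.length_pyRange_one]

def sublistas (lista : List Int) : List (List Int) :=
  -- 'for i in range(tam): … resultado.append(listaAux)'
  let resultado : List (List Int) :=
    (PySem.List.pyRange 0 (lista.length : Int) 1).foldl
      (fun resultado i => resultado ++ [sublistasRowA lista i]) []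
  -- 'for i in resultado: resultado = resultado + sublistas(i)'  (iterates the ORIGINAL resultado)
  resultado.attach.foldl (fun acc p => acc ++ sublistas p.1) resultado
termination_by lista.length
decreasing_by
  obtain ⟨x, hx⟩ := p
  have hres : resultado = (PySem.List.pyRange 0 (lista.length : Int) 1).foldl
      (fun r i => r ++ [sublistasRowA lista i]) [] := rfl
  -- every member of resultado is a row of length tam-1, and membership forces tam ≥ 1
  have : ∀ (l : List Int) (acc : List (List Int)),
      (l.foldl (fun r i => r ++ [sublistasRowA lista i]) acc) = acc ++ l.map (sublistasRowA lista) := by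
    intro l
    induction l with
    | nil => simp
    | cons x xs ih => intro acc; simp [List.foldl_cons, ih]
  simp only [hres, this, List.nil_append, List.mem_map] at hx
  obtain ⟨j, hj, hje⟩ := hx
  rw [PySem.List.mem_pyRange_one] at hj
  have hpos : 0 < lista.length := by exact_mod_cast lt_of_le_of_lt hj.1 hj.2
  simp only [← hje, sublistasRowA_length]
  omega

-- ===== PORT B =====
-- 'rots = [[cur[(i+j)%n] for j in range(n-1)] for i in range(n)]' (index always in range, default never taken)
def sublistasRotsB (cur : List Int) : List (List Int) :=
  (PySem.List.pyRange 0 (cur.length : Int) 1).map (fun i =>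
    (PySem.List.pyRange 0 ((cur.length : Int) - 1) 1).map (fun j =>
      PySem.List.pyGetD cur (PySem.Int.mod (i + j) (cur.length : Int)) 0))

-- termination facts for the worklist loop, cited by name in decreasing_by
theorem sublistasRotsB_facts (cur : List Int) :
    (sublistasRotsB cur).length = cur.length ∧
      ∀ r ∈ sublistasRotsB cur, r.length = ((cur.length : Int) - 1).toNat := by
  constructor
  · simp [sublistasRotsB, PySem.List.length_pyRange_one]
  · intro r hr
    simp only [sublistasRotsB, List.mem_map] at hr
    obtain ⟨i, _, hi⟩ := hr
    rw [← hi]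
    simp [PySem.List.length_pyRange_one]

-- 'while stack: cur = stack.pop(0); … result += rots; stack = rots + stack'
def sublistasLoopB (result : List (List Int)) (stack : List (List Int)) : List (List Int) :=
  match stack with
  | [] => result
  | cur :: rest =>
      let rots := sublistasRotsB cur
      sublistasLoopB (result ++ rots) (rots ++ rest)
termination_by ((stack.map (fun l => Nat.factorial (l.length + 1))).sum)
decreasing_by
  simp only [List.map_cons, List.map_append, List.sum_cons, List.sum_append]
  obtain ⟨hlen, hmem⟩ := sublistasRotsB_facts cur
  have hconst : (sublistasRotsB cur).map (fun l => Nat.factorial (l.length + 1))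
      = (sublistasRotsB cur).map (fun _ => Nat.factorial (((cur.length : Int) - 1).toNat + 1)) :=
    List.map_congr_left (fun r hr => by rw [hmem r hr])
  rw [hconst, List.map_const', List.sum_replicate, hlen, smul_eq_mul]
  rcases Nat.eq_zero_or_pos cur.length with h0 | hpos
  · simp [h0, Nat.factorial]
  · have h1 : ((cur.length : Int) - 1).toNat + 1 = cur.length := by omega
    rw [h1]
    have hlt : cur.length * Nat.factorial cur.length < Nat.factorial (cur.length + 1) := by
      rw [Nat.factorial_succ]
      exact (Nat.mul_lt_mul_right (Nat.factorial_pos _)).2 (Nat.lt_succ_self _)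
    omega

def sublistas_alt (lista : List Int) : List (List Int) :=
  sublistasLoopB [] [lista]

-- ===== PRECONDITION & SPEC =====
def Spec_sublistas (lista : List Int) (out : List (List Int)) : Prop := out = sublistas_alt lista
instance (lista : List Int) (out : List (List Int)) : Decidable (Spec_sublistas lista out) := by unfold Spec_sublistas; infer_instance

-- ===== CLAIM (what is proved, stated in full; the proofs are below) =====
def Claim_equal_sublistas : Prop := ∀ (lista : List Int), Dom_sublistas lista → Spec_sublistas lista (sublistas lista)

-- ===== LEMMAS AND PROOFS =====

theorem foldl_append_map {α β : Type} (g : α → β) :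
    ∀ (l : List α) (acc : List β),
      l.foldl (fun a x => a ++ [g x]) acc = acc ++ l.map g := by
  intro l
  induction l with
  | nil => simp
  | cons x xs ih => intro acc; simp [List.foldl_cons, ih]

theorem foldl_attach_append {α : Type} (g : α → List (List Int)) :
    ∀ (l : List α) (acc : List (List Int)),
      l.attach.foldl (fun a p => a ++ g p.1) acc = acc ++ (l.map g).flatten := by
  intro l
  induction l with
  | nil => simp
  | cons x xs ih =>
      intro acc
      simp only [List.attach_cons, List.foldl_cons, List.foldl_map, List.map_cons,
        List.flatten_cons, ← List.append_assoc]
      exact ih _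

-- characterisation of A: its rows are exactly B's rots, and its result is
-- rots(L) followed by the flattened recursive results of the rots.
theorem sublistas_unfold (lista : List Int) :
    sublistas lista = sublistasRotsB lista ++ ((sublistasRotsB lista).map sublistas).flatten := by
  rw [sublistas]
  have hrows : (PySem.List.pyRange 0 (lista.length : Int) 1).foldl
      (fun r i => r ++ [sublistasRowA lista i]) [] = sublistasRotsB lista := by
    rw [foldl_append_map]
    simp only [List.nil_append, sublistasRotsB]
    refine List.map_congr_left (fun i _ => ?_)
    rw [sublistasRowA, foldl_append_map, List.nil_append]
  rw [hrows, foldl_attach_append]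

theorem sublistasLoopB_eq (result stack : List (List Int)) :
    sublistasLoopB result stack = result ++ (stack.map sublistas).flatten := by
  fun_induction sublistasLoopB result stack with
  | case1 result => simp
  | case2 result cur rest rots ih =>
      rw [ih]
      simp only [List.map_cons, List.flatten_cons]
      rw [sublistas_unfold cur]
      simp only [rots, List.map_append, List.flatten_append, List.append_assoc]

-- ===== VERDICT (by name: the statement is the Claim_ definition above) =====
theorem sublistas_spec : Claim_equal_sublistas := by
  intro lista _
  unfold Spec_sublistas sublistas_alt
  rw [sublistasLoopB_eq]
  simp
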